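-- pv_equiv track=rewrite | github.com/xuezhaojun/server-foundation-agent | workflows/weekly-bot-pr-hygiene/collect_checks.py | classify_checks
-- ===== SOURCE A (Python) =====
-- EXCLUDED_CHECKS = {"tide"}
--
-- def classify_checks(checks):
--     """Classify PR check status, excluding tide."""
--     relevant = [c for c in checks if c.get("name") not in EXCLUDED_CHECKS]
--
--     if not relevant:
--         return "no_checks", []
--
--     buckets = [c.get("bucket", "") for c in relevant]
--     failed = [c["name"] for c in relevant if c.get("bucket") == "fail"]
--
--     if all(b == "pass" for b in buckets):
--         return "all_passed", []
--     if all(b == "pending" for b in buckets):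
--         return "all_pending", []
--     if failed:
--         return "has_failures", failed
--     # Mix of pass and pending (no failures)
--     return "mixed", []
-- ===== SOURCE B (Python) =====
-- EXCLUDED_CHECKS = {"tide"}
--
-- def classify_checks(checks):
--     """Classify PR check status, excluding tide (single counting pass)."""
--     n_total = n_pass = n_pending = 0
--     failed = []
--     for c in checks:
--         if c.get("name") in EXCLUDED_CHECKS:
--             continue
--         b = c.get("bucket", "")
--         n_total += 1
--         if b == "pass":
--             n_pass += 1
--         elif b == "pending":
--             n_pending += 1
--         elif b == "fail":
--             failed.append(c["name"])
--     if n_total == 0: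
--         return "no_checks", []
--     if n_pass == n_total:
--         return "all_passed", []
--     if n_pending == n_total:
--         return "all_pending", []
--     if failed:
--         return "has_failures", failed
--     return "mixed", []
-- ===== Notes on version B (the rewrite author's own statement) =====
-- stated objective: simpler
-- what changed: Replaces A's four separate passes (two comprehensions plus two all() scans over a materialised buckets list) with one loop maintaining total/pass/pending counters and the failed-name list, deciding the category from the counters afterwards.
import Mathlib
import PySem

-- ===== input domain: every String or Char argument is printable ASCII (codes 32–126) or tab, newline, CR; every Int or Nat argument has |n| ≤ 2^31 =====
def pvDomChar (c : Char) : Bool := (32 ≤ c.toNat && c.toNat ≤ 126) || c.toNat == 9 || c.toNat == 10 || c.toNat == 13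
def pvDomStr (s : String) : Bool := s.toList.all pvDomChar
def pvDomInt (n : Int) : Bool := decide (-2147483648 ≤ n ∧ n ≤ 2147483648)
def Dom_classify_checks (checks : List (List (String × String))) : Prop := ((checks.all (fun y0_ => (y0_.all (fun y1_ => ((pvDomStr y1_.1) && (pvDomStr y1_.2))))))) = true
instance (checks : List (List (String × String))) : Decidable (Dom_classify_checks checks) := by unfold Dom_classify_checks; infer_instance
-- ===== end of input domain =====

-- B replaces A's four passes (two comprehensions + two all() scans) with one counting loop: simpler decomposition, same results.
-- Pre_ excludes inputs where Python A raises KeyError (a non-"tide" check with bucket "fail" and no "name" key); Python B raises there too.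


-- shared assoc-list lookup = Python dict.get (first match); used by both ports
def pvGet (c : List (String × String)) (k : String) : Option String :=
  (c.find? (fun p => p.1 == k)).map (·.2)

-- ===== PORT A =====
def classify_checks (checks : List (List (String × String))) : String × List String :=
  let relevant := checks.filter (fun c => !(pvGet c "name" == some "tide"))
  if relevant = [] then ("no_checks", [])
  else
    let buckets := relevant.map (fun c => (pvGet c "bucket").getD "")
    -- c["name"]: KeyError (missing key) excluded by Pre_; getD "" is never the returned value inside Pre_
    let failed := (relevant.filter (fun c => pvGet c "bucket" == some "fail")).map
      (fun c => (pvGet c "name").getD "")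
    if buckets.all (fun b => b == "pass") then ("all_passed", [])
    else if buckets.all (fun b => b == "pending") then ("all_pending", [])
    else if failed ≠ [] then ("has_failures", failed)
    else ("mixed", [])

-- ===== PORT B =====
def classify_checks_step (st : Nat × Nat × Nat × List String) (c : List (String × String)) :
    Nat × Nat × Nat × List String :=
  if pvGet c "name" == some "tide" then st
  else
    let b := (pvGet c "bucket").getD ""
    let (t, p, pe, f) := st
    if b == "pass" then (t + 1, p + 1, pe, f)
    else if b == "pending" then (t + 1, p, pe + 1, f)
    -- c["name"]: KeyError excluded by Pre_
    else if b == "fail" then (t + 1, p, pe, f ++ [(pvGet c "name").getD ""])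
    else (t + 1, p, pe, f)

def classify_checks_alt (checks : List (List (String × String))) : String × List String :=
  let st := checks.foldl classify_checks_step (0, 0, 0, [])
  let t := st.1; let p := st.2.1; let pe := st.2.2.1; let f := st.2.2.2
  if t = 0 then ("no_checks", [])
  else if p = t then ("all_passed", [])
  else if pe = t then ("all_pending", [])
  else if f ≠ [] then ("has_failures", f)
  else ("mixed", [])

-- ===== PRECONDITION & SPEC =====
-- Pre_ excludes exactly the inputs on which Python A raises KeyError: a check kept (name ≠ "tide")
-- whose bucket is "fail" but which has no "name" key.
def Pre_classify_checks (checks : List (List (String × String))) : Prop :=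
  ∀ c ∈ checks, (pvGet c "name" ≠ some "tide" ∧ pvGet c "bucket" = some "fail") →
    (pvGet c "name").isSome = true
instance (checks : List (List (String × String))) : Decidable (Pre_classify_checks checks) := by
  unfold Pre_classify_checks; infer_instance
def pvWitness_classify_checks : (List (List (String × String))) :=
  [[("name", "unit"), ("bucket", "pass")], [("name", "lint"), ("bucket", "fail")]]
def Spec_classify_checks (checks : List (List (String × String))) (out : String × List String) : Prop := out = classify_checks_alt checks
instance (checks : List (List (String × String))) (out : String × List String) : Decidable (Spec_classify_checks checks out) := by unfold Spec_classify_checks; infer_instance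

-- ===== CLAIM (what is proved, stated in full; the proofs are below) =====
def Claim_equal_classify_checks : Prop := ∀ (checks : List (List (String × String))), Dom_classify_checks checks → Pre_classify_checks checks → Spec_classify_checks checks (classify_checks checks)

-- ===== LEMMAS AND PROOFS =====

-- abbreviations for the pieces of A's result
def pvKeep (c : List (String × String)) : Bool := !(pvGet c "name" == some "tide")
def pvIsPass (c : List (String × String)) : Bool := ((pvGet c "bucket").getD "" == "pass")
def pvIsPend (c : List (String × String)) : Bool := ((pvGet c "bucket").getD "" == "pending")
def pvIsFail (c : List (String × String)) : Bool := (pvGet c "bucket" == some "fail")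

lemma pvIsFail_getD (c : List (String × String)) :
    pvIsFail c = ((pvGet c "bucket").getD "" == "fail") := by
  unfold pvIsFail
  cases pvGet c "bucket" <;> simp

-- the one-pass fold computes: total kept, kept-pass count, kept-pending count, failed names
lemma foldB_spec (l : List (List (String × String))) : ∀ (t p pe : Nat) (f : List String),
    l.foldl classify_checks_step (t, p, pe, f) =
      (t + (l.filter pvKeep).length,
       p + ((l.filter pvKeep).filter pvIsPass).length,
       pe + ((l.filter pvKeep).filter pvIsPend).length,
       f ++ ((l.filter pvKeep).filter pvIsFail).map (fun c => (pvGet c "name").getD "")) := by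
  induction l with
  | nil => intro t p pe f; simp
  | cons c l ih =>
    intro t p pe f
    by_cases hk : (pvGet c "name" == some "tide") = true
    · simp [List.foldl_cons, classify_checks_step, hk, pvKeep, ih]
    · have hk' : pvKeep c = true := by simp [pvKeep, hk]
      rw [List.foldl_cons]
      by_cases hp : ((pvGet c "bucket").getD "" == "pass") = true
      · have h1 : pvIsPass c = true := hp
        have h2 : pvIsPend c = false := by
          unfold pvIsPend; simp_all
        have h3 : pvIsFail c = false := by
          rw [pvIsFail_getD]; simp_all
        simp [classify_checks_step, hk, hp, ih, hk', h1, h2, h3]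
        omega
      · by_cases hpe : ((pvGet c "bucket").getD "" == "pending") = true
        · have h1 : pvIsPass c = false := by unfold pvIsPass; simp_all
          have h2 : pvIsPend c = true := hpe
          have h3 : pvIsFail c = false := by rw [pvIsFail_getD]; simp_all
          simp [classify_checks_step, hk, hp, hpe, ih, hk', h1, h2, h3]
          omega
        · by_cases hf : ((pvGet c "bucket").getD "" == "fail") = true
          · have h1 : pvIsPass c = false := by unfold pvIsPass; simp_all
            have h2 : pvIsPend c = false := by unfold pvIsPend; simp_all
            have h3 : pvIsFail c = true := by rw [pvIsFail_getD]; exact hf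
            simp [classify_checks_step, hk, hp, hpe, hf, ih, hk', h1, h2, h3]
            omega
          · have h1 : pvIsPass c = false := by unfold pvIsPass; simp_all
            have h2 : pvIsPend c = false := by unfold pvIsPend; simp_all
            have h3 : pvIsFail c = false := by rw [pvIsFail_getD]; simp_all
            simp [classify_checks_step, hk, hp, hpe, hf, ih, hk', h1, h2, h3]
            omega

-- ===== VERDICT (by name: the statement is the Claim_ definition above) =====
theorem classify_checks_spec : Claim_equal_classify_checks := by
  intro checks _ _
  unfold Spec_classify_checks classify_checks classify_checks_alt
  rw [foldB_spec]
  simp only [show (fun c => !(pvGet c "name" == some "tide")) = pvKeep from rfl,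
    show (fun c => pvGet c "bucket" == some "fail") = pvIsFail from rfl,
    Nat.zero_add, List.nil_append]
  set rel := checks.filter pvKeep with hrel
  have e1 : ((rel.map (fun c => (pvGet c "bucket").getD "")).all (fun b => b == "pass") = true)
      ↔ (rel.filter pvIsPass).length = rel.length := by
    rw [List.length_filter_eq_length_iff, List.all_map, List.all_eq_true]
    exact Iff.rfl
  have e2 : ((rel.map (fun c => (pvGet c "bucket").getD "")).all (fun b => b == "pending") = true)
      ↔ (rel.filter pvIsPend).length = rel.length := by
    rw [List.length_filter_eq_length_iff, List.all_map, List.all_eq_true]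
    exact Iff.rfl
  by_cases h0 : rel = []
  · rw [if_pos h0, if_pos (show rel.length = 0 from by rw [h0]; rfl)]
  · rw [if_neg h0, if_neg (fun h => h0 (List.length_eq_zero_iff.mp h))]
    by_cases hp : (rel.map (fun c => (pvGet c "bucket").getD "")).all (fun b => b == "pass") = true
    · rw [if_pos hp, if_pos (e1.mp hp)]
    · rw [if_neg hp, if_neg (fun h => hp (e1.mpr h))]
      by_cases hpe : (rel.map (fun c => (pvGet c "bucket").getD "")).all (fun b => b == "pending") = true
      · rw [if_pos hpe, if_pos (e2.mp hpe)]
      · rw [if_neg hpe, if_neg (fun h => hpe (e2.mpr h))]
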